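-- pv_equiv track=rewrite | github.com/1aeo/TorUtils | memory/tools/timeseries-charts.py | find_relay_changes
-- ===== SOURCE A (Python) =====
-- def find_relay_changes(dates: list, num_relays: list) -> list[tuple]:
--     """Find points where relay count changes."""
--     changes = []
--     if not num_relays:
--         return changes
--
--     changes.append((dates[0], num_relays[0]))
--     prev_count = num_relays[0]
--     for i in range(1, len(num_relays)):
--         if num_relays[i] != prev_count:
--             changes.append((dates[i], num_relays[i]))
--             prev_count = num_relays[i]
--
--     return changes
-- ===== SOURCE B (Python) =====
-- def find_relay_changes(dates: list, num_relays: list) -> list[tuple]: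
--     """Find points where relay count changes (groupby-style run skipping)."""
--     pairs = list(zip(dates, num_relays))
--     changes = []
--     i = 0
--     while i < len(pairs):
--         # the head of each run of equal counts is a change point
--         changes.append(pairs[i])
--         key = pairs[i][1]
--         while i < len(pairs) and pairs[i][1] == key:
--             i += 1
--     return changes
-- ===== Notes on version B (the rewrite author's own statement) =====
-- stated objective: alternative
-- what changed: Replaces A's stateful index loop (carrying prev_count and comparing each count with it) by a groupby-style run-skipper over the zipped (date, count) pairs: an outer loop emits the head pair of each run of equal counts and an inner loop skips the rest of the run.
import Mathlib
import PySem

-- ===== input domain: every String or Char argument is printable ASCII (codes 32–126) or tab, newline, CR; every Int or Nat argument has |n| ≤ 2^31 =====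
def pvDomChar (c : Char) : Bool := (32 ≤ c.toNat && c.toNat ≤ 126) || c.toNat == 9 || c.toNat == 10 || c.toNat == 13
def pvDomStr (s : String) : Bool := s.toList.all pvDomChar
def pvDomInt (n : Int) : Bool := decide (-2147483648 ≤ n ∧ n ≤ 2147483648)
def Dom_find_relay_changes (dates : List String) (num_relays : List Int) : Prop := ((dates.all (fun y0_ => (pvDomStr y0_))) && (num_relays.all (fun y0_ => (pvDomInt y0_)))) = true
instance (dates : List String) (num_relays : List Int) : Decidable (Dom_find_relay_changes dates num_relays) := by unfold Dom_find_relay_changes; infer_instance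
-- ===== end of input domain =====

-- B replaces A's stateful compare-with-previous loop over indices by a groupby-style
-- run-skipper over the zipped (date, count) pairs, emitting the head of each run of
-- equal counts; objective: alternative (same O(n) cost, different decomposition).


-- ===== PORT A =====
-- Literal port of A: unconditional first append, then a loop over range(1, len(num_relays))
-- carrying (changes, prev_count).  dates[i] / num_relays[i] are indexed via pyGetD; Pre_
-- keeps every index A actually reads within range, so the default is never returned on
-- admitted inputs.  pvStepA names A's per-iteration step (same state, same branch order).
def pvStepA (dates : List String) (num_relays : List Int)
    (st : List (String × Int) × Int) (i : Int) : List (String × Int) × Int :=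
  if PySem.List.pyGetD num_relays i 0 ≠ st.2 then
    (st.1 ++ [(PySem.List.pyGetD dates i "", PySem.List.pyGetD num_relays i 0)],
     PySem.List.pyGetD num_relays i 0)
  else st

def find_relay_changes (dates : List String) (num_relays : List Int) : List (String × Int) :=
  if num_relays = [] then []
  else
    ((PySem.List.pyRange 1 (num_relays.length : Int) 1).foldl (pvStepA dates num_relays)
      ([(PySem.List.pyGetD dates 0 "", PySem.List.pyGetD num_relays 0 0)],
       PySem.List.pyGetD num_relays 0 0)).1

-- ===== PORT B =====
-- Port of B: zip the two lists, then emit the head of each run of equal counts.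
-- pvAfterRun is Source B's inner while: skip the rest of the run keyed by `key`, then
-- (back in the outer loop) emit the next run's head and continue.
def pvAfterRun (key : Int) : List (String × Int) → List (String × Int)
  | [] => []
  | p :: rest => if p.2 = key then pvAfterRun key rest else p :: pvAfterRun p.2 rest

def pvGroupHeads : List (String × Int) → List (String × Int)
  | [] => []
  | p :: rest => p :: pvAfterRun p.2 rest

def find_relay_changes_alt (dates : List String) (num_relays : List Int) : List (String × Int) :=
  pvGroupHeads (dates.zip num_relays)

-- ===== PRECONDITION & SPEC =====
-- Pre_ excludes exactly the inputs on which Python A raises IndexError: a nonempty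
-- num_relays with no dates at all, or a count beyond the last date that differs from
-- the count at the last date (A would read the missing dates[i] at that change point).
def Pre_find_relay_changes (dates : List String) (num_relays : List Int) : Prop :=
  num_relays = [] ∨
    (dates ≠ [] ∧
      ∀ n ∈ num_relays.drop dates.length, n = num_relays.getD (dates.length - 1) 0)
instance (dates : List String) (num_relays : List Int) : Decidable (Pre_find_relay_changes dates num_relays) := by unfold Pre_find_relay_changes; infer_instance

def pvWitness_find_relay_changes : List String × List Int := (["a", "b", "c"], [1, 1, 2])

def Spec_find_relay_changes (dates : List String) (num_relays : List Int) (out : List (String × Int)) : Prop := out = find_relay_changes_alt dates num_relays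
instance (dates : List String) (num_relays : List Int) (out : List (String × Int)) : Decidable (Spec_find_relay_changes dates num_relays out) := by unfold Spec_find_relay_changes; infer_instance

-- ===== CLAIM (what is proved, stated in full; the proofs are below) =====
def Claim_equal_find_relay_changes : Prop := ∀ (dates : List String) (num_relays : List Int), Dom_find_relay_changes dates num_relays → Pre_find_relay_changes dates num_relays → Spec_find_relay_changes dates num_relays (find_relay_changes dates num_relays)

-- ===== LEMMAS AND PROOFS =====

-- A's loop, rewritten as structural recursion on the tails: from index i on, A appends
-- (dates[i], num_relays[i]) whenever the count differs from prev, updating prev.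
def pvRecA : Int → List String → List Int → List (String × Int)
  | _, _, [] => []
  | prev, ds, n :: ns =>
      if n ≠ prev then (ds.headD "", n) :: pvRecA n ds.tail ns
      else pvRecA prev ds.tail ns

-- Bridge: A's foldl over pyRange k .. len equals pvRecA on the dropped tails.
theorem pvBridgeA (ds : List String) (ns : List Int) (k : Int) (hk : 0 ≤ k)
    (acc : List (String × Int)) (prev : Int) :
    ((PySem.List.pyRange k (ns.length : Int) 1).foldl (pvStepA ds ns) (acc, prev)).1
      = acc ++ pvRecA prev (ds.drop k.toNat) (ns.drop k.toNat) := by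
  by_cases h : (ns.length : Int) ≤ k
  · rw [PySem.List.pyRange_one_eq_nil h]
    have hnil : ns.drop k.toNat = [] := List.drop_eq_nil_of_le (by omega)
    simp [hnil, pvRecA]
  · have hlt : k < (ns.length : Int) := by omega
    have hkn : k.toNat < ns.length := by omega
    rw [PySem.List.pyRange_one_cons hlt]
    have hns : ns.drop k.toNat = ns[k.toNat] :: ns.drop (k.toNat + 1) :=
      List.drop_eq_getElem_cons hkn
    have hget : PySem.List.pyGetD ns k 0 = ns[k.toNat] :=
      PySem.List.pyGetD_eq_getElem ns 0 hk hlt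
    have hdget : PySem.List.pyGetD ds k "" = (ds.drop k.toNat).headD "" := by
      rw [PySem.List.pyGetD_of_nonneg ds "" hk, List.getD_eq_getElem?_getD,
        List.headD_eq_head?, List.head?_drop]
    have htn : (k + 1).toNat = k.toNat + 1 := by omega
    have ih1 := pvBridgeA ds ns (k + 1) (by omega)
    rw [hns]
    by_cases hc : ns[k.toNat] ≠ prev
    · simp only [List.foldl_cons, pvStepA, hget, hc, pvRecA, ne_eq,
        not_false_eq_true, if_pos]
      rw [ih1, htn, hdget, List.tail_drop, List.append_assoc, List.singleton_append]
    · rw [not_ne_iff] at hc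
      simp only [List.foldl_cons, pvStepA, hget, hc, ne_eq, not_true_eq_false, if_false]
      rw [ih1, htn]
      simp only [pvRecA, ne_eq, not_true_eq_false, if_false, List.tail_drop]
termination_by ((ns.length : Int) - k).toNat
decreasing_by all_goals (simp_wf; omega)

-- If every remaining count equals prev, A appends nothing more.
theorem pvRecA_nil (prev : Int) (ds : List String) (ns : List Int)
    (h : ∀ n ∈ ns, n = prev) : pvRecA prev ds ns = [] := by
  induction ns generalizing prev ds with
  | nil => rfl
  | cons n ns ih =>
    have hn : n = prev := h n (by simp)
    simp only [pvRecA, hn, ne_eq, not_true_eq_false, if_false]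
    exact ih prev ds.tail (fun m hm => h m (List.mem_cons_of_mem _ hm))

-- "No change after the dates run out": every count at an index ≥ dates.length equals
-- its predecessor, phrased as structural recursion on the two tails.
def pvOk : Int → List String → List Int → Prop
  | prev, [], ns => ∀ n ∈ ns, n = prev
  | _, _ :: _, [] => True
  | _, _ :: ds, n :: ns => pvOk n ds ns

theorem pvOk_of (ds : List String) (ns : List Int) (prev : Int)
    (h : ∀ n ∈ ns.drop ds.length, n = (prev :: ns).getD ds.length 0) :
    pvOk prev ds ns := by
  induction ds generalizing prev ns with
  | nil => simpa [pvOk] using h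
  | cons d ds ih =>
    cases ns with
    | nil => trivial
    | cons n ns =>
      show pvOk n ds ns
      exact ih ns n (by simpa using h)

-- Core: after skipping the rest of the run keyed by prev, B's run-skipper over the
-- zipped pairs emits exactly what A's loop appends.
theorem pvRun_eq (ns : List Int) (ds : List String) (prev : Int)
    (hok : pvOk prev ds ns) :
    pvAfterRun prev (ds.zip ns) = pvRecA prev ds ns := by
  induction ns generalizing ds prev with
  | nil => simp [pvAfterRun, pvRecA]
  | cons n ns ih =>
    cases ds with
    | nil =>
      simp only [List.zip_nil_left, pvAfterRun]
      exact (pvRecA_nil prev [] (n :: ns) hok).symm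
    | cons d ds =>
      have hok' : pvOk n ds ns := hok
      by_cases hn : n = prev
      · subst hn
        simp only [List.zip_cons_cons, pvAfterRun, pvRecA, ne_eq,
          not_true_eq_false, if_false, List.tail_cons]
        exact ih ds n hok'
      · simp only [List.zip_cons_cons, pvAfterRun, pvRecA, ne_eq, hn,
          not_false_eq_true, if_pos, List.headD_cons, List.tail_cons]
        exact List.cons_eq_cons.mpr ⟨rfl, ih ds n hok'⟩

-- ===== VERDICT (by name: the statements are the Claim_ definitions above) =====
theorem find_relay_changes_spec : Claim_equal_find_relay_changes := by
  intro dates num_relays _ hpre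
  unfold Spec_find_relay_changes find_relay_changes find_relay_changes_alt
  cases num_relays with
  | nil => simp [pvGroupHeads]
  | cons n0 ns =>
    rcases hpre with h | ⟨hd, hall⟩
    · exact absurd h (by simp)
    · obtain ⟨d0, ds, rfl⟩ : ∃ d0 ds, dates = d0 :: ds := by
        cases dates with
        | nil => exact absurd rfl hd
        | cons d0 ds => exact ⟨d0, ds, rfl⟩
      rw [if_neg (by simp)]
      simp only [PySem.List.pyGetD_zero_cons]
      have hb := pvBridgeA (d0 :: ds) (n0 :: ns) 1 (by omega)
        [(PySem.List.pyGetD (d0 :: ds) 0 "", PySem.List.pyGetD (n0 :: ns) 0 0)]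
        (PySem.List.pyGetD (n0 :: ns) 0 0)
      simp only [PySem.List.pyGetD_zero_cons, Int.toNat_one, List.drop_one,
        List.tail_cons] at hb
      rw [hb]
      have hok : pvOk n0 ds ns := pvOk_of ds ns n0 (by simpa using hall)
      simp only [List.zip_cons_cons, pvGroupHeads, List.singleton_append]
      rw [pvRun_eq ns ds n0 hok]
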